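-- pv_equiv track=rewrite | github.com/avielmoshe/Introduction-to-Computer-Science | homework7.py | is_mirror_pair
-- ===== SOURCE A (Python) =====
-- def is_mirror_pair(a, b):
--     if a <= 0 or b <= 0:
--         return False
--
--     count_a = 0
--     temp = a
--     while temp > 0:
--         count_a += 1
--         temp //= 10
--
--     count_b = 0
--     temp = b
--     while temp > 0:
--         count_b += 1
--         temp //= 10
--
--     if count_a != count_b:
--         return False
--
--     reversed_a = 0
--     temp = a
--     while temp > 0:
--         reversed_a = reversed_a * 10 + temp % 10
--         temp //= 10
--
--     return reversed_a == b
-- ===== SOURCE B (Python) =====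
-- def is_mirror_pair(a, b):
--     if a <= 0 or b <= 0:
--         return False
--     return str(a)[::-1] == str(b)
-- ===== Notes on version B (the rewrite author's own statement) =====
-- stated objective: idiomatic
-- what changed: Replaces A's two digit-counting loops, the count comparison and the arithmetic digit-reversal loop with a single decimal-string reversal comparison str(a)[::-1] == str(b) after the positivity guard.
import Mathlib
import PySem

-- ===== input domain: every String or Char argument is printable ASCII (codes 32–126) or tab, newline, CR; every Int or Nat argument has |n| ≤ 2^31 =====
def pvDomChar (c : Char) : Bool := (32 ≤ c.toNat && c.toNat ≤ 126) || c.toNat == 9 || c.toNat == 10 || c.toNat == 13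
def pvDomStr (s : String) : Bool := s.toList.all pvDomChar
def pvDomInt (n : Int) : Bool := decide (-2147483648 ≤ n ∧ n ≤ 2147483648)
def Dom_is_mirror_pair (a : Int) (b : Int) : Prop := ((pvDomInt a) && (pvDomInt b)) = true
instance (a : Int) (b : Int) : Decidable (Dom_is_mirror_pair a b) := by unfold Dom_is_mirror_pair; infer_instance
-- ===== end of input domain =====

-- B replaces A's two digit-counting loops and arithmetic reversal loop with one
-- decimal-string reversal comparison (same positivity guard); equal return value proved.

-- termination helper cited by the loop ports' `decreasing_by`
lemma pv_floordiv_ten_lt (t : Int) (h : 0 < t) :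
    (PySem.Int.floordiv t 10).toNat < t.toNat := by
  rw [PySem.Int.floordiv_eq_ediv_of_pos (by norm_num)]
  have h1 : t / 10 < t := by
    have := Int.ediv_le_self 10 (le_of_lt h)
    omega
  have h2 : 0 ≤ t / 10 := Int.ediv_nonneg (le_of_lt h) (by norm_num)
  omega

-- ===== PORT A =====
-- the `while temp > 0: count += 1; temp //= 10` loop
def pvCountLoop (temp : Int) (count : Int) : Int :=
  if 0 < temp then pvCountLoop (PySem.Int.floordiv temp 10) (count + 1) else count
termination_by temp.toNat
decreasing_by exact pv_floordiv_ten_lt _ (by assumption)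

-- the `while temp > 0: reversed_a = reversed_a * 10 + temp % 10; temp //= 10` loop
def pvRevLoop (temp : Int) (rev : Int) : Int :=
  if 0 < temp then pvRevLoop (PySem.Int.floordiv temp 10) (rev * 10 + PySem.Int.mod temp 10) else rev
termination_by temp.toNat
decreasing_by exact pv_floordiv_ten_lt _ (by assumption)

def is_mirror_pair (a : Int) (b : Int) : Bool :=
  if a ≤ 0 ∨ b ≤ 0 then false
  else
    let count_a := pvCountLoop a 0
    let count_b := pvCountLoop b 0
    if count_a ≠ count_b then false
    else
      let reversed_a := pvRevLoop a 0
      reversed_a == b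

-- ===== PORT B =====
def is_mirror_pair_alt (a : Int) (b : Int) : Bool :=
  if a ≤ 0 ∨ b ≤ 0 then false
  else
    -- str(a)[::-1] == str(b);  slice with step -1 never raises, so getD "" is exact
    ((PySem.Str.slice? (PySem.Int.toStr a) none none (-1)).getD "") == PySem.Int.toStr b

-- ===== PRECONDITION & SPEC =====
def Spec_is_mirror_pair (a : Int) (b : Int) (out : Bool) : Prop := out = is_mirror_pair_alt a b
instance (a : Int) (b : Int) (out : Bool) : Decidable (Spec_is_mirror_pair a b out) := by unfold Spec_is_mirror_pair; infer_instance

-- ===== CLAIM (what is proved, stated in full; the proofs are below) =====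
def Claim_equal_is_mirror_pair : Prop := ∀ (a : Int) (b : Int), Dom_is_mirror_pair a b → Spec_is_mirror_pair a b (is_mirror_pair a b)

-- ===== LEMMAS AND PROOFS =====

-- Nat.toDigitsCore in terms of Nat.digits (enough fuel, positive input)
lemma pv_toDigitsCore_eq (b : Nat) (hb : 2 ≤ b) :
    ∀ (f n : Nat) (acc : List Char), 0 < n → n < f →
      Nat.toDigitsCore b f n acc = ((Nat.digits b n).map Nat.digitChar).reverse ++ acc := by
  intro f
  induction f with
  | zero => intro n acc hn hf; omega
  | succ f ih =>
    intro n acc hn hf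
    rw [Nat.toDigitsCore]
    by_cases h : n / b = 0
    · have hnb : n < b := by have := Nat.div_eq_zero_iff.mp h; omega
      simp only [h, if_true]
      rw [Nat.digits_def' (by omega) hn, h, Nat.digits_zero]
      simp
    · simp only [h, if_false]
      have hpos : 0 < n / b := Nat.pos_of_ne_zero h
      have hlt : n / b < f := by
        have hdn : n / b < n := Nat.div_lt_self hn (by omega : 1 < b)
        omega
      rw [ih (n / b) _ hpos hlt, Nat.digits_def' (by omega) hn]
      simp

lemma pv_toDigits_eq (b n : Nat) (hb : 2 ≤ b) (hn : 0 < n) :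
    Nat.toDigits b n = ((Nat.digits b n).map Nat.digitChar).reverse ++ [] := by
  rw [Nat.toDigits]
  exact pv_toDigitsCore_eq b hb (n + 1) n [] hn (by omega)

-- digitChar is injective on decimal digits
lemma pv_digitChar_inj : ∀ x < 10, ∀ y < 10, Nat.digitChar x = Nat.digitChar y → x = y := by decide

-- lists of decimal digits with equal digitChar images are equal
lemma pv_map_digitChar_injOn (l1 l2 : List Nat) (h1 : ∀ x ∈ l1, x < 10) (h2 : ∀ x ∈ l2, x < 10)
    (h : l1.map Nat.digitChar = l2.map Nat.digitChar) : l1 = l2 := by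
  induction l1 generalizing l2 with
  | nil => cases l2 <;> simp_all
  | cons x xs ih =>
    cases l2 with
    | nil => simp_all
    | cons y ys =>
      simp only [List.map_cons, List.cons.injEq] at h
      have hx := pv_digitChar_inj x (h1 x (by simp)) y (h2 y (by simp)) h.1
      subst hx
      rw [ih ys (fun z hz => h1 z (by simp [hz])) (fun z hz => h2 z (by simp [hz])) h.2]

-- the count loop counts the decimal digits
lemma pv_countLoop_eq (n : Nat) : ∀ (c : Int), pvCountLoop (n : Int) c = c + (Nat.digits 10 n).length := by
  induction n using Nat.strong_induction_on with
  | _ n ih =>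
    intro c
    rw [pvCountLoop]
    by_cases hn : 0 < n
    · have h10 : PySem.Int.floordiv (n : Int) 10 = ((n / 10 : Nat) : Int) := by
        exact_mod_cast PySem.Int.floordiv_natCast n 10
      simp only [show 0 < (n : Int) from by exact_mod_cast hn, if_true, h10]
      rw [ih (n / 10) (Nat.div_lt_self hn (by norm_num)) (c + 1),
          Nat.digits_def' (b := 10) (by norm_num) hn]
      simp; omega
    · have hn0 : n = 0 := by omega
      subst hn0; simp

-- the reversal loop computes the reversed digit list's value
lemma pv_revLoop_eq (n : Nat) : ∀ (acc : Int),
    pvRevLoop (n : Int) acc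
      = acc * 10 ^ (Nat.digits 10 n).length + ((Nat.ofDigits 10 (Nat.digits 10 n).reverse : Nat) : Int) := by
  induction n using Nat.strong_induction_on with
  | _ n ih =>
    intro acc
    rw [pvRevLoop]
    by_cases hn : 0 < n
    · have h10 : PySem.Int.floordiv (n : Int) 10 = ((n / 10 : Nat) : Int) := by
        exact_mod_cast PySem.Int.floordiv_natCast n 10
      have hm10 : PySem.Int.mod (n : Int) 10 = ((n % 10 : Nat) : Int) := by
        exact_mod_cast PySem.Int.mod_natCast n 10
      simp only [show 0 < (n : Int) from by exact_mod_cast hn, if_true, h10, hm10]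
      rw [ih (n / 10) (Nat.div_lt_self hn (by norm_num)) _,
          Nat.digits_def' (b := 10) (by norm_num) hn]
      simp only [List.reverse_cons, List.length_cons, Nat.ofDigits_append,
        Nat.ofDigits_singleton, List.length_reverse]
      push_cast
      ring
    · have hn0 : n = 0 := by omega
      subst hn0; simp

-- digit-list form of A's positive branch ↔ digit-list form of B's positive branch
lemma pv_core (A B : Nat) :
    ((Nat.digits 10 A).length = (Nat.digits 10 B).length ∧
      Nat.ofDigits 10 (Nat.digits 10 A).reverse = B)
      ↔ Nat.digits 10 A = (Nat.digits 10 B).reverse := by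
  constructor
  · rintro ⟨hlen, hval⟩
    have hlt : ∀ x ∈ (Nat.digits 10 A).reverse, x < 10 := by
      intro x hx
      exact Nat.digits_lt_base (by norm_num) (List.mem_reverse.mp hx)
    have hlast : ∀ (h : (Nat.digits 10 A).reverse ≠ []), ((Nat.digits 10 A).reverse).getLast h ≠ 0 := by
      intro hne hz
      -- last of the reverse is the lowest digit of A; if it were 0, B would have fewer digits
      have hsplit : (Nat.digits 10 A).reverse = ((Nat.digits 10 A).reverse).dropLast ++ [0] := by
        conv_lhs => rw [← List.dropLast_append_getLast hne]
        rw [hz]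
      set l := ((Nat.digits 10 A).reverse).dropLast with hldef
      have hlB : l.length + 1 = (Nat.digits 10 B).length := by
        have h1 : (Nat.digits 10 A).reverse.length = l.length + 1 := by rw [hsplit]; simp
        simp only [List.length_reverse] at h1
        omega
      have hofd : Nat.ofDigits 10 (Nat.digits 10 A).reverse = Nat.ofDigits 10 l := by
        conv_lhs => rw [hsplit]
        rw [Nat.ofDigits_append]
        simp
      have hvB : Nat.ofDigits 10 l = B := by rw [← hofd]; exact hval
      have hlt' : Nat.ofDigits 10 l < 10 ^ l.length :=
        Nat.ofDigits_lt_base_pow_length' (fun x hx => hlt x (by rw [hsplit]; simp [hx]))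
      have : (Nat.digits 10 B).length ≤ l.length :=
        (Nat.digits_length_le_iff (by norm_num) B).mpr (by omega)
      omega
    have := Nat.digits_ofDigits 10 (by norm_num) (Nat.digits 10 A).reverse hlt hlast
    rw [hval] at this
    rw [this, List.reverse_reverse]
  · intro h
    have h' : (Nat.digits 10 A).reverse = Nat.digits 10 B := by rw [h]; simp
    constructor
    · rw [h]; simp
    · rw [h', Nat.ofDigits_digits]

-- ===== VERDICT (by name: the statement is the Claim_ definition above) =====
theorem is_mirror_pair_spec : Claim_equal_is_mirror_pair := by
  intro a b _
  unfold Spec_is_mirror_pair is_mirror_pair is_mirror_pair_alt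
  by_cases hg : a ≤ 0 ∨ b ≤ 0
  · simp [hg]
  · simp only [hg, if_false]
    have ha : (0:Int) < a := by omega
    have hb : (0:Int) < b := by omega
    obtain ⟨A, rfl⟩ : ∃ A : Nat, a = (A : Int) := ⟨a.toNat, by omega⟩
    obtain ⟨B, rfl⟩ : ∃ B : Nat, b = (B : Int) := ⟨b.toNat, by omega⟩
    have hA : 0 < A := by exact_mod_cast ha
    have hB : 0 < B := by exact_mod_cast hb
    -- left side: A's loops, in digit-list terms
    rw [PySem.Str.slice?_none_none_neg_one]
    simp only [Option.getD_some, pv_countLoop_eq, pv_revLoop_eq, zero_mul, zero_add]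
    -- right side: the string comparison, in digit-list terms
    have htl : ∀ n : Nat, 0 < n →
        (PySem.Int.toStr (n : Int)).toList = ((Nat.digits 10 n).map Nat.digitChar).reverse := by
      intro n hn
      rw [PySem.Int.toList_toStr, PySem.Int.toChars]
      simp only [show ¬((n : Int) < 0) from by omega, Int.toNat_natCast]
      rw [pv_toDigits_eq 10 n (by norm_num) hn]
      simp
    have key := pv_core A B
    rcases Bool.eq_false_or_eq_true
        ((String.ofList (PySem.Int.toStr (A : Int)).toList.reverse) == PySem.Int.toStr (B : Int)) with hrhs | hrhs
    · -- the strings agree: A's branch must also return true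
      rw [hrhs]
      rw [beq_iff_eq, String.ext_iff, String.toList_ofList,
        htl A hA, htl B hB, List.reverse_reverse] at hrhs
      have hdig : Nat.digits 10 A = (Nat.digits 10 B).reverse := by
        apply pv_map_digitChar_injOn
        · intro x hx; exact Nat.digits_lt_base (by norm_num) hx
        · intro x hx; exact Nat.digits_lt_base (by norm_num) (List.mem_reverse.mp hx)
        · rw [hrhs]; simp [List.map_reverse]
      obtain ⟨hl, hv⟩ := key.mpr hdig
      simp only [hl, ne_eq, not_true_eq_false, if_false]
      rw [beq_iff_eq]
      exact_mod_cast hv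
    · -- the strings differ: A's branch must also return false
      rw [hrhs]
      rw [beq_eq_false_iff_ne, ne_eq, String.ext_iff, String.toList_ofList,
        htl A hA, htl B hB, List.reverse_reverse] at hrhs
      have hnot : ¬ ((Nat.digits 10 A).length = (Nat.digits 10 B).length ∧
          Nat.ofDigits 10 (Nat.digits 10 A).reverse = B) := by
        intro hc
        apply hrhs
        rw [key.mp hc]
        simp [List.map_reverse]
      by_cases hl : ((Nat.digits 10 A).length : Int) = ((Nat.digits 10 B).length : Int)
      · have hl' : (Nat.digits 10 A).length = (Nat.digits 10 B).length := by exact_mod_cast hl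
        have hv : Nat.ofDigits 10 (Nat.digits 10 A).reverse ≠ B := fun hc => hnot ⟨hl', hc⟩
        simp only [hl, ne_eq, not_true_eq_false, if_false]
        rw [beq_eq_false_iff_ne]
        exact_mod_cast hv
      · simp [hl]
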